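-- pv_equiv track=rewrite | github.com/salma-mounaam/cybersentinel | services/dast-engine/app/dast_service.py | filter_alerts
-- ===== SOURCE A (Python) =====
-- def filter_alerts(alerts: list) -> list:
--     filtered = []
--     seen = set()
--
--     for alert in alerts:
--         risk = (alert.get("risk") or "").lower()
--         key = (alert.get("alert"), alert.get("url"))
--
--         if risk == "informational":
--             continue
--
--         if key in seen:
--             continue
--
--         seen.add(key)
--         filtered.append(alert)
--
--     return filtered
-- ===== SOURCE B (Python) =====
-- def filter_alerts(alerts: list) -> list:
--     def keep(i, a):
--         if (a.get("risk") or "").lower() == "informational":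
--             return False
--         key = (a.get("alert"), a.get("url"))
--         return not any(
--             (b.get("alert"), b.get("url")) == key
--             for b in alerts[:i]
--             if (b.get("risk") or "").lower() != "informational"
--         )
--     return [a for i, a in enumerate(alerts) if keep(i, a)]
-- ===== Notes on version B (the rewrite author's own statement) =====
-- stated objective: alternative
-- what changed: Drops A's incrementally maintained seen-set entirely: B decides each alert independently by a stateless predicate that rescans the list prefix for an earlier non-informational alert with the same (alert,url) key, trading A's hash-set state for a quadratic direct scan.
import Mathlib
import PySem

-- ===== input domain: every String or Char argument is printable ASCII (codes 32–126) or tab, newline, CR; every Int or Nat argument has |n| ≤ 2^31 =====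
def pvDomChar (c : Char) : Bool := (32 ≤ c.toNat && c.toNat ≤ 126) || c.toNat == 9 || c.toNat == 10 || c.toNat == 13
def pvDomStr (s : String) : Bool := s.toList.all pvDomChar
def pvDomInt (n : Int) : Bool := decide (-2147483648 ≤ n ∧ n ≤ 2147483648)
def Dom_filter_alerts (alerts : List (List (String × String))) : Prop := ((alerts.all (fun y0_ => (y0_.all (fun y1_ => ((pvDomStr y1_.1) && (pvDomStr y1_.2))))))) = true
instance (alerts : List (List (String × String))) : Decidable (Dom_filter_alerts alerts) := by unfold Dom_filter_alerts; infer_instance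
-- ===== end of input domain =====

-- B replaces A's incrementally maintained seen-set with a stateless per-element predicate
-- that rescans the list prefix for an earlier non-informational alert with the same key.

-- shared dict accessors: alert.get(k) and (alert.get("risk") or "").lower()
def pvGetKey (alert : List (String × String)) (k : String) : Option String :=
  (PySem.Dict.mk alert).get? k

def pvRisk (alert : List (String × String)) : String :=
  PySem.Str.lower (match pvGetKey alert "risk" with
    | some s => if s = "" then "" else s
    | none => "")

def pvKey (alert : List (String × String)) : Option String × Option String :=
  (pvGetKey alert "alert", pvGetKey alert "url")

-- ===== PORT A =====
-- one loop: skip informational, skip keys already in the seen set, otherwise record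
def filterAlertsStepA
    (st : List (List (String × String)) × PySem.Set (Option String × Option String))
    (alert : List (String × String)) :
    List (List (String × String)) × PySem.Set (Option String × Option String) :=
  if pvRisk alert = "informational" then st
  else if PySem.Set.contains st.2 (pvKey alert) then st
  else (st.1 ++ [alert], PySem.Set.add st.2 (pvKey alert))

def filter_alerts (alerts : List (List (String × String))) : List (List (String × String)) :=
  (alerts.foldl filterAlertsStepA ([], PySem.Set.empty)).1

-- ===== PORT B =====
-- keep(i, a): non-informational and no earlier non-informational alert in alerts[:i] shares its key
def pvKeepB (alerts : List (List (String × String))) (i : Int) (a : List (String × String)) : Bool :=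
  if pvRisk a = "informational" then false
  else !((PySem.List.slice alerts none (some i)).any
          (fun b => !(pvRisk b = "informational") && decide (pvKey b = pvKey a)))

def filter_alerts_alt (alerts : List (List (String × String))) : List (List (String × String)) :=
  ((PySem.List.enumerate alerts).filter (fun ia => pvKeepB alerts ia.1 ia.2)).map (fun ia => ia.2)

-- ===== PRECONDITION & SPEC =====
def Spec_filter_alerts (alerts : List (List (String × String))) (out : List (List (String × String))) : Prop := out = filter_alerts_alt alerts
instance (alerts : List (List (String × String))) (out : List (List (String × String))) : Decidable (Spec_filter_alerts alerts out) := by unfold Spec_filter_alerts; infer_instance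

-- ===== CLAIM (what is proved, stated in full; the proofs are below) =====
def Claim_equal_filter_alerts : Prop := ∀ (alerts : List (List (String × String))), Dom_filter_alerts alerts → Spec_filter_alerts alerts (filter_alerts alerts)

-- ===== LEMMAS AND PROOFS =====
theorem foldA_eq_filterB (rest pre out : List (List (String × String)))
    (S : PySem.Set (Option String × Option String))
    (hS : ∀ k, k ∈ S ↔ ∃ b ∈ pre, ¬ pvRisk b = "informational" ∧ pvKey b = k) :
    (rest.foldl filterAlertsStepA (out, S)).1
      = out ++ ((PySem.List.enumerate rest ((pre.length : Nat) : Int)).filter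
          (fun ia => pvKeepB (pre ++ rest) ia.1 ia.2)).map (fun ia => ia.2) := by
  induction rest generalizing pre out S with
  | nil => simp [PySem.List.enumerate_nil]
  | cons a rest ih =>
    have hslice : PySem.List.slice (pre ++ a :: rest) none (some ((pre.length : Nat) : Int)) = pre := by
      rw [PySem.List.slice_to_natCast]; simp
    have hpredA : ((pre.any (fun b => !(pvRisk b = "informational") && decide (pvKey b = pvKey a))) = true)
        ↔ pvKey a ∈ S := by
      rw [hS]; simp [List.any_eq_true]
    have hL : pre ++ a :: rest = (pre ++ [a]) ++ rest := by simp
    have hlen : ((pre.length : Nat) : Int) + 1 = (((pre ++ [a]).length : Nat) : Int) := by simp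
    by_cases h1 : pvRisk a = "informational"
    · have hK : pvKeepB (pre ++ a :: rest) ((pre.length : Nat) : Int) a = false := by
        simp [pvKeepB, h1]
      have hstep : filterAlertsStepA (out, S) a = (out, S) := by
        simp [filterAlertsStepA, h1]
      have hinv : ∀ k, k ∈ S ↔ ∃ b ∈ pre ++ [a], ¬ pvRisk b = "informational" ∧ pvKey b = k := by
        intro k
        rw [hS k]
        constructor
        · rintro ⟨b, hb, hr, hk⟩; exact ⟨b, by simp [hb], hr, hk⟩
        · rintro ⟨b, hb, hr, hk⟩
          rcases List.mem_append.1 hb with hb | hb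
          · exact ⟨b, hb, hr, hk⟩
          · simp at hb; subst hb; exact absurd h1 hr
      have hih := ih (pre ++ [a]) out S hinv
      rw [← hL] at hih
      rw [List.foldl_cons, hstep, hih, PySem.List.enumerate_cons, List.filter_cons, hK, hlen]
      simp
    · by_cases hm : pvKey a ∈ S
      · have hK : pvKeepB (pre ++ a :: rest) ((pre.length : Nat) : Int) a = false := by
          unfold pvKeepB
          rw [if_neg h1, hslice, hpredA.2 hm]
          rfl
        have hstep : filterAlertsStepA (out, S) a = (out, S) := by
          simp [filterAlertsStepA, h1, hm]
        have hinv : ∀ k, k ∈ S ↔ ∃ b ∈ pre ++ [a], ¬ pvRisk b = "informational" ∧ pvKey b = k := by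
          intro k
          rw [hS k]
          constructor
          · rintro ⟨b, hb, hr, hk⟩; exact ⟨b, by simp [hb], hr, hk⟩
          · rintro ⟨b, hb, hr, hk⟩
            rcases List.mem_append.1 hb with hb | hb
            · exact ⟨b, hb, hr, hk⟩
            · simp at hb; subst hb; subst hk; exact (hS _).1 hm
        have hih := ih (pre ++ [a]) out S hinv
        rw [← hL] at hih
        rw [List.foldl_cons, hstep, hih, PySem.List.enumerate_cons, List.filter_cons, hK, hlen]
        simp
      · have hany : (pre.any (fun b => !(pvRisk b = "informational") && decide (pvKey b = pvKey a))) = false := by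
          rw [Bool.eq_false_iff]
          intro h; exact hm (hpredA.1 h)
        have hK : pvKeepB (pre ++ a :: rest) ((pre.length : Nat) : Int) a = true := by
          unfold pvKeepB
          rw [if_neg h1, hslice, hany]
          rfl
        have hstep : filterAlertsStepA (out, S) a = (out ++ [a], PySem.Set.add S (pvKey a)) := by
          simp [filterAlertsStepA, h1, hm]
        have hinv : ∀ k, k ∈ PySem.Set.add S (pvKey a)
            ↔ ∃ b ∈ pre ++ [a], ¬ pvRisk b = "informational" ∧ pvKey b = k := by
          intro k
          rw [PySem.Set.mem_add]
          constructor
          · rintro (hk | hk)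
            · rcases (hS k).1 hk with ⟨b, hb, hr, hkk⟩; exact ⟨b, by simp [hb], hr, hkk⟩
            · exact ⟨a, by simp, h1, hk.symm⟩
          · rintro ⟨b, hb, hr, hk⟩
            rcases List.mem_append.1 hb with hb | hb
            · exact Or.inl ((hS k).2 ⟨b, hb, hr, hk⟩)
            · simp at hb; subst hb; exact Or.inr hk.symm
        have hih := ih (pre ++ [a]) (out ++ [a]) (PySem.Set.add S (pvKey a)) hinv
        rw [← hL] at hih
        rw [List.foldl_cons, hstep, hih, PySem.List.enumerate_cons, List.filter_cons, hK, hlen]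
        simp

-- ===== VERDICT (by name: the statement is the Claim_ definition above) =====
theorem filter_alerts_spec : Claim_equal_filter_alerts := by
  intro alerts _
  unfold Spec_filter_alerts filter_alerts filter_alerts_alt
  have := foldA_eq_filterB alerts [] [] PySem.Set.empty (by simp [PySem.Set.empty])
  simpa using this
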